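-- pv_equiv track=rewrite | github.com/INHA-Algorithm/Algorithm-study | 김창성/DP/양팔저울-2629.py | dp
-- ===== SOURCE A (Python) =====
-- def dp(N, weights, totalWeight, marble):
--     balance = [False]*40001
--     balance[0] = True
--
--     for i in range(N):
--         for j in range(totalWeight,-1,-1):
--             if balance[j]:
--                 balance[j + weights[i]] = True
--         for j in range(0,totalWeight):
--             if balance[j]:
--                 balance[abs(j - weights[i])] = True
--
--     if balance[marble]:
--         return "Y"
--     return "N"
-- ===== SOURCE B (Python) =====
-- def dp(N, weights, totalWeight, marble):
--     # Reachable weights kept as a big-integer bitset: bit s = "weight s reachable".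
--     # Per weight w: add pass = shift/OR of the bits s <= totalWeight; the
--     # |s - w| pass splits into a right shift (s >= w) and a bit reflection
--     # around w (s < w), built by one walk over the low bits.
--     mask = 1
--     if N > 0 and totalWeight >= 0:
--         full = (1 << (totalWeight + 1)) - 1
--         for w in weights[:N]:
--             mask |= (mask & full) << w
--             low = mask & (full >> 1)
--             mask |= low >> w
--             r = low & ((1 << w) - 1)
--             rev = 0
--             p = 0
--             while r:
--                 if r & 1:
--                     rev |= 1 << (w - p)
--                 r >>= 1
--                 p += 1
--             mask |= rev
--     return "Y" if (mask >> marble) & 1 else "N"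
-- ===== Notes on version B (the rewrite author's own statement) =====
-- stated objective: alternative
-- what changed: A scans a fixed 40001-slot boolean table index by index (two in-place range loops per weight); B keeps the reachable set as one big-integer bitset and updates it per weight with shift/AND/OR word operations (add pass = masked left shift, |s-w| pass = right shift plus a bit reflection around w built from the low bits), testing the marble by a single shift.
-- outside the precondition, e.g. on dp(1, [40000], 0, -1): A returns 'Y', B raises ValueError; on dp(1, [-40000], 0, 1): A returns 'Y', B raises ValueError; on dp(2, [3, 39999], 2, 0): A returns 'Y', B returns 'Y'
import Mathlib
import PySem

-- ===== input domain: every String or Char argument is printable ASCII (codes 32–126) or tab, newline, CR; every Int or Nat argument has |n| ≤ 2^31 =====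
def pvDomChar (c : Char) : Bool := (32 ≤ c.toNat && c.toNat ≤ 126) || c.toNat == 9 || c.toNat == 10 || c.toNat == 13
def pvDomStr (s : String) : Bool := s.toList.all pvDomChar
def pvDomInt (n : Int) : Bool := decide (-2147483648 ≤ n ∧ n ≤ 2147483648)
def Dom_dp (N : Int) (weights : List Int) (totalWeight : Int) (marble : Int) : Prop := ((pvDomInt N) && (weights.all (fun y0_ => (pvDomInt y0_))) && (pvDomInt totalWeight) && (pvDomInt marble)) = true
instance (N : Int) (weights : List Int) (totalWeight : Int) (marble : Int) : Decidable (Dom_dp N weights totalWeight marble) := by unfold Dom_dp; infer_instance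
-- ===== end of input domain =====

-- B replaces A's fixed 40001-slot boolean table (scanned index by index, updated in place)
-- by one big-integer bitset updated with shift/AND/OR operations ("alternative" objective).

-- ===== PORT A =====
-- Python's index normalization for a list of length n (negative index counts from the end)
def pyWrap (n : Nat) (i : Int) : Int := if i < 0 then i + n else i

-- Python 'balance[i]' read (negative index wraps; out of range = IndexError, excluded by Pre_, modelled as false)
def pyGetBool (b : Array Bool) (i : Int) : Bool :=
  if 0 ≤ pyWrap b.size i ∧ (pyWrap b.size i).toNat < b.size
  then b.getD (pyWrap b.size i).toNat false else false

-- Python 'balance[i] = True' (negative index wraps; out of range = IndexError, excluded by Pre_, modelled as no-op)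
def pySetTrue (b : Array Bool) (i : Int) : Array Bool :=
  if 0 ≤ pyWrap b.size i ∧ (pyWrap b.size i).toNat < b.size
  then b.set! (pyWrap b.size i).toNat true else b

-- the body 'if balance[j]: balance[e(j)] = True' shared by A's two inner loops
def innerStep (e : Int → Int) (b : Array Bool) (j : Int) : Array Bool :=
  if pyGetBool b j then pySetTrue b (e j) else b

-- one iteration of A's outer loop: the two inner 'for j in range(...)' loops over the table
def stepA (T w : Int) (b : Array Bool) : Array Bool :=
  (PySem.List.pyRange 0 T 1).foldl (innerStep (fun j => |j - w|))
    ((PySem.List.pyRange T (-1) (-1)).foldl (innerStep (fun j => j + w)) b)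

def dp (N : Int) (weights : List Int) (totalWeight : Int) (marble : Int) : String :=
  let balance : Array Bool := (Array.replicate 40001 false).set! 0 true
  -- weights[i] (in range under Pre_) is read once per outer iteration; Python reads it lazily, same value
  let balance := (PySem.List.pyRange 0 N 1).foldl
    (fun bal i => stepA totalWeight (PySem.List.pyGetD weights i 0) bal) balance
  if pyGetBool balance marble then "Y" else "N"

-- ===== PORT B =====
-- the bit-reflection loop: 'while r: if r&1: rev |= 1 << (w-p); r >>= 1; p += 1'
def revLoop (w : Nat) (r p rev : Nat) : Nat :=
  if r = 0 then rev
  else revLoop w (r >>> 1) (p + 1) (if r &&& 1 = 1 then rev ||| (1 <<< (w - p)) else rev)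
termination_by r
decreasing_by have : r >>> 1 = r / 2 := Nat.shiftRight_one r; omega

-- the loop body for one weight w (Python big-int bit ops; shift counts are Nat — exact for 0 ≤ w, which Pre_ guarantees whenever the loop runs; Python raises ValueError on a negative shift count)
def stepBit (full : Nat) (w : Nat) (mask : Nat) : Nat :=
  let mask := mask ||| ((mask &&& full) <<< w)
  let low := mask &&& (full >>> 1)
  let mask := mask ||| (low >>> w)
  mask ||| revLoop w (low &&& ((1 <<< w) - 1)) 0 0

def dp_alt (N : Int) (weights : List Int) (totalWeight : Int) (marble : Int) : String :=
  let mask : Nat := 1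
  let mask := if 0 < N ∧ 0 ≤ totalWeight then
      (PySem.List.slice weights none (some N)).foldl
        (fun m w => stepBit ((1 <<< (totalWeight.toNat + 1)) - 1) w.toNat m) mask
    else mask
  -- '(mask >> marble) & 1' — exact for 0 ≤ marble (Pre_); Python raises ValueError for marble < 0
  if (mask >>> marble.toNat) &&& 1 = 1 then "Y" else "N"

-- ===== PRECONDITION & SPEC =====
-- prefix check: weights are nonnegative and every table write stays in range
-- (reachable values never exceed the running sum s of earlier weights, and the first
-- inner loop only extends slots j ≤ totalWeight, so min T s + w bounds every write)
def wOKb (T : Int) : List Int → Int → Bool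
  | [], _ => true
  | w :: ws, s => (decide (0 ≤ w) && decide (min T s + w ≤ 40000)) && wOKb T ws (s + w)

-- Pre_ restricts to the problem's natural domain. Outside it B's own algorithm raises where A returns:
-- a negative marble (A reads the table through negative-index wraparound; B's 'mask >> marble' raises
-- ValueError) and, when the loop runs, negative weights (A writes through wraparound; B's negative shift
-- counts raise ValueError). Also excluded because A raises: marble > 40000 (IndexError), N > len(weights)
-- (IndexError), totalWeight > 40000 (IndexError), and writes past slot 40000 — the wOKb bound for the
-- latter is slightly conservative: A can also return when an out-of-range slot stays unreachable.
def Pre_dp (N : Int) (weights : List Int) (totalWeight : Int) (marble : Int) : Prop :=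
  0 ≤ marble ∧ marble ≤ 40000 ∧
  (0 ≤ totalWeight → 1 ≤ N →
    N ≤ weights.length ∧ totalWeight ≤ 40000 ∧
    wOKb totalWeight (weights.take N.toNat) 0 = true)
instance (N : Int) (weights : List Int) (totalWeight : Int) (marble : Int) : Decidable (Pre_dp N weights totalWeight marble) := by unfold Pre_dp; infer_instance

def pvWitness_dp : Int × List Int × Int × Int := (2, [1, 3], 5, 2)

def Spec_dp (N : Int) (weights : List Int) (totalWeight : Int) (marble : Int) (out : String) : Prop := out = dp_alt N weights totalWeight marble
instance (N : Int) (weights : List Int) (totalWeight : Int) (marble : Int) (out : String) : Decidable (Spec_dp N weights totalWeight marble out) := by unfold Spec_dp; infer_instance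

-- ===== CLAIM (what is proved, stated in full; the proofs are below) =====
def Claim_equal_dp : Prop := ∀ (N : Int) (weights : List Int) (totalWeight : Int) (marble : Int), Dom_dp N weights totalWeight marble → Pre_dp N weights totalWeight marble → Spec_dp N weights totalWeight marble (dp N weights totalWeight marble)

-- ===== LEMMAS AND PROOFS =====
set_option maxRecDepth 4000

theorem pyWrap_nonneg (n : Nat) (i : Int) (h : 0 ≤ i) : pyWrap n i = i := by
  unfold pyWrap; rw [if_neg (by omega)]

theorem size_pySetTrue (b : Array Bool) (i : Int) : (pySetTrue b i).size = b.size := by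
  unfold pySetTrue; split <;> simp [Array.set!]

theorem pySetTrue_nonneg (b : Array Bool) (i : Int) (hi : 0 ≤ i) (hi2 : i < b.size) :
    pySetTrue b i = b.set! i.toNat true := by
  unfold pySetTrue
  rw [pyWrap_nonneg _ _ hi, if_pos ⟨hi, by omega⟩]

theorem getD_set_true (b : Array Bool) (i j : Nat) (hi : i < b.size) :
    (b.set! i true).getD j false = (if i = j then true else b.getD j false) := by
  simp only [Array.set!, Array.getD_eq_getD_getElem?, Array.getElem?_setIfInBounds]
  by_cases he : i = j
  · subst he; simp [hi]
  · simp [he]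

theorem getBool_setTrue (b : Array Bool) (i k : Int) (hi : 0 ≤ i) (hi2 : i < b.size) (hk : 0 ≤ k) :
    pyGetBool (pySetTrue b i) k = (pyGetBool b k || decide (k = i)) := by
  rw [pySetTrue_nonneg b i hi hi2]
  unfold pyGetBool
  have hsz : (b.set! i.toNat true).size = b.size := by simp [Array.set!]
  rw [hsz, pyWrap_nonneg b.size k hk]
  by_cases h : 0 ≤ k ∧ k.toNat < b.size
  · rw [if_pos h, if_pos h, getD_set_true b i.toNat k.toNat (by omega)]
    by_cases he : k = i
    · subst he; simp
    · rw [if_neg (by omega)]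
      simp [he]
  · rw [if_neg h, if_neg h]
    have hne : ¬ k = i := by omega
    simp [hne]

theorem getBool_setTrue_mono (b : Array Bool) (i k : Int)
    (h : pyGetBool b k = true) : pyGetBool (pySetTrue b i) k = true := by
  unfold pySetTrue
  by_cases hik : 0 ≤ pyWrap b.size i ∧ (pyWrap b.size i).toNat < b.size
  · rw [if_pos hik]
    unfold pyGetBool at h ⊢
    have hsz : (b.set! (pyWrap b.size i).toNat true).size = b.size := by simp [Array.set!]
    rw [hsz]
    by_cases hc : 0 ≤ pyWrap b.size k ∧ (pyWrap b.size k).toNat < b.size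
    · rw [if_pos hc] at h
      rw [if_pos hc, getD_set_true b _ _ hik.2]
      split
      · rfl
      · exact h
    · rw [if_neg hc] at h
      exact absurd h (by simp)
  · rw [if_neg hik]; exact h

theorem bool_or_elim (a b : Bool) (h : (a || b) = true) : a = true ∨ b = true := by
  simpa using h

theorem size_innerStep (e : Int → Int) (b : Array Bool) (j : Int) :
    (innerStep e b j).size = b.size := by
  unfold innerStep; split <;> simp [size_pySetTrue]

theorem size_innerFold (e : Int → Int) (l : List Int) (b : Array Bool) :
    (l.foldl (innerStep e) b).size = b.size := by
  induction l generalizing b with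
  | nil => rfl
  | cons x t ih => simp only [List.foldl_cons, ih, size_innerStep]

theorem innerFold_mono (e : Int → Int) (l : List Int) (b : Array Bool) (k : Int)
    (h : pyGetBool b k = true) : pyGetBool (l.foldl (innerStep e) b) k = true := by
  induction l generalizing b with
  | nil => exact h
  | cons x t ih =>
    apply ih
    unfold innerStep; split
    · exact getBool_setTrue_mono _ _ _ h
    · exact h

-- characterization of A's first (descending) inner loop
theorem loop1_char (w : Int) (hw : 0 ≤ w) (n : Nat) :
    ∀ (T : Int), T < n → ∀ (b : Array Bool), b.size = 40001 →
    (∀ j : Int, 0 ≤ j → j ≤ T → pyGetBool b j = true → j + w ≤ 40000) →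
    ∀ (k : Int), 0 ≤ k →
    (pyGetBool ((PySem.List.pyRange T (-1) (-1)).foldl (innerStep (fun j => j + w)) b) k = true
      ↔ pyGetBool b k = true ∨ ∃ j : Int, 0 ≤ j ∧ j ≤ T ∧ pyGetBool b j = true ∧ k = j + w) := by
  induction n with
  | zero =>
    intro T hT b _ _ k _
    rw [PySem.List.pyRange_neg_one_eq_nil (by omega)]
    simp only [List.foldl_nil]
    constructor
    · exact Or.inl
    · rintro (h | ⟨j, h0, h1, _, _⟩)
      · exact h
      · omega
  | succ n ih =>
    intro T hT b hsz hin k hk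
    by_cases hT0 : T < 0
    · rw [PySem.List.pyRange_neg_one_eq_nil (by omega)]
      simp only [List.foldl_nil]
      constructor
      · exact Or.inl
      · rintro (h | ⟨j, h0, h1, _, _⟩)
        · exact h
        · omega
    · rw [PySem.List.pyRange_neg_one_cons (by omega : (-1:Int) < T)]
      simp only [List.foldl_cons]
      have hsz' : (innerStep (fun j => j + w) b T).size = 40001 := by rw [size_innerStep, hsz]
      have hin' : ∀ j : Int, 0 ≤ j → j ≤ T - 1 →
          pyGetBool (innerStep (fun j => j + w) b T) j = true → j + w ≤ 40000 := by
        intro j hj hjT hG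
        unfold innerStep at hG
        split at hG
        case isTrue hbT =>
          rw [getBool_setTrue b (T + w) j (by omega) (by
            have := hin T (by omega) (le_refl T) hbT; omega) hj] at hG
          rcases bool_or_elim _ _ hG with hG | hG
          · exact hin j hj (by omega) hG
          · have : j = T + w := by simpa using hG
            omega
        case isFalse => exact hin j hj (by omega) hG
      rw [ih (T - 1) (by omega) _ hsz' hin' k hk]
      by_cases hbT : pyGetBool b T = true
      · have hb' : innerStep (fun j => j + w) b T = pySetTrue b (T + w) := by
          unfold innerStep; rw [if_pos hbT]
        have hTw : T + w ≤ 40000 := hin T (by omega) (le_refl T) hbT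
        have hg : ∀ x : Int, 0 ≤ x →
            pyGetBool (pySetTrue b (T + w)) x = (pyGetBool b x || decide (x = T + w)) := by
          intro x hx
          exact getBool_setTrue b (T + w) x (by omega) (by omega) hx
        rw [hb']
        constructor
        · rintro (h | ⟨j, h0, h1, h2, h3⟩)
          · rw [hg k hk] at h
            rcases bool_or_elim _ _ h with h | h
            · exact Or.inl h
            · exact Or.inr ⟨T, by omega, le_refl T, hbT, by simpa using h⟩
          · rw [hg j h0] at h2
            rcases bool_or_elim _ _ h2 with h2 | h2
            · exact Or.inr ⟨j, h0, by omega, h2, h3⟩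
            · have : j = T + w := by simpa using h2
              omega
        · rintro (h | ⟨j, h0, h1, h2, h3⟩)
          · refine Or.inl ?_
            rw [hg k hk, h]; rfl
          · by_cases hj : j = T
            · subst hj
              refine Or.inl ?_
              rw [hg k hk]
              simp [h3]
            · refine Or.inr ⟨j, h0, by omega, ?_, h3⟩
              rw [hg j h0, h2]; rfl
      · have hb' : innerStep (fun j => j + w) b T = b := by
          unfold innerStep; rw [if_neg hbT]
        rw [hb']
        constructor
        · rintro (h | ⟨j, h0, h1, h2, h3⟩)
          · exact Or.inl h
          · exact Or.inr ⟨j, h0, by omega, h2, h3⟩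
        · rintro (h | ⟨j, h0, h1, h2, h3⟩)
          · exact Or.inl h
          · by_cases hj : j = T
            · subst hj; exact absurd h2 hbT
            · exact Or.inr ⟨j, h0, by omega, h2, h3⟩

-- characterization of A's second (ascending) inner loop: its in-place cascades are redundant
theorem loop2_char (w : Int) (hw : 0 ≤ w) (hw2 : w ≤ 40000) (n : Nat) :
    ∀ (T : Int), T < n → T ≤ 40000 → ∀ (b : Array Bool), b.size = 40001 →
    ∀ (k : Int), 0 ≤ k →
    (pyGetBool ((PySem.List.pyRange 0 T 1).foldl (innerStep (fun j => |j - w|)) b) k = true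
      ↔ pyGetBool b k = true ∨ ∃ j : Int, 0 ≤ j ∧ j < T ∧ pyGetBool b j = true ∧ k = |j - w|) := by
  induction n with
  | zero =>
    intro T hT _ b _ k _
    rw [PySem.List.pyRange_one_eq_nil (by omega)]
    simp only [List.foldl_nil]
    constructor
    · exact Or.inl
    · rintro (h | ⟨j, h0, h1, _, _⟩)
      · exact h
      · omega
  | succ n ih =>
    intro T hT hT40 b hsz k hk
    by_cases hT0 : T ≤ 0
    · rw [PySem.List.pyRange_one_eq_nil (by omega)]
      simp only [List.foldl_nil]
      constructor
      · exact Or.inl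
      · rintro (h | ⟨j, h0, h1, _, _⟩)
        · exact h
        · omega
    · have hTsplit : T = (T - 1) + 1 := by omega
      rw [hTsplit, PySem.List.pyRange_one_succ_right (by omega), List.foldl_append]
      simp only [List.foldl_cons, List.foldl_nil]
      have hszt : ((PySem.List.pyRange 0 (T - 1) 1).foldl (innerStep (fun j => |j - w|)) b).size = 40001 := by
        rw [size_innerFold, hsz]
      set bt := (PySem.List.pyRange 0 (T - 1) 1).foldl (innerStep (fun j => |j - w|)) b with hbt_def
      have hmono : ∀ x : Int, pyGetBool b x = true → pyGetBool bt x = true := by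
        intro x hx; exact innerFold_mono _ _ _ _ hx
      have iht := ih (T - 1) (by omega) (by omega) b hsz
      by_cases hbtT : pyGetBool bt (T - 1) = true
      · have hstep : innerStep (fun j => |j - w|) bt (T - 1) = pySetTrue bt |T - 1 - w| := by
          unfold innerStep; rw [if_pos hbtT]
        have habs : (0:Int) ≤ |T - 1 - w| ∧ |T - 1 - w| ≤ 40000 := by
          constructor
          · exact abs_nonneg _
          · rcases abs_cases (T - 1 - w) with ⟨he, _⟩ | ⟨he, _⟩ <;> omega
        have hg : ∀ x : Int, 0 ≤ x →
            pyGetBool (pySetTrue bt |T - 1 - w|) x = (pyGetBool bt x || decide (x = |T - 1 - w|)) := by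
          intro x hx
          exact getBool_setTrue bt _ x habs.1 (by omega) hx
        rw [hstep]
        constructor
        · intro h
          rw [hg k hk] at h
          rcases bool_or_elim _ _ h with h | h
          · rcases (iht k hk).1 h with h | ⟨j, h0, h1, h2, h3⟩
            · exact Or.inl h
            · exact Or.inr ⟨j, h0, by omega, h2, h3⟩
          · have hkval : k = |T - 1 - w| := by simpa using h
            rcases (iht (T - 1) (by omega)).1 hbtT with h' | ⟨j0, g0, g1, g2, g3⟩
            · exact Or.inr ⟨T - 1, by omega, by omega, h', hkval⟩
            · have h4 : T - 1 = w - j0 := by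
                rcases abs_cases (j0 - w) with ⟨he, _⟩ | ⟨he, _⟩ <;> omega
              have hkj : k = j0 := by
                rcases abs_cases (T - 1 - w) with ⟨he, _⟩ | ⟨he, _⟩ <;> omega
              refine Or.inl ?_
              rw [hkj]; exact g2
        · rintro (h | ⟨j, h0, h1, h2, h3⟩)
          · rw [hg k hk, hmono k h]; rfl
          · by_cases hj : j = T - 1
            · subst hj
              rw [hg k hk]
              simp [h3]
            · have hbtk : pyGetBool bt k = true :=
                (iht k hk).2 (Or.inr ⟨j, h0, by omega, h2, h3⟩)
              rw [hg k hk, hbtk]; rfl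
      · have hstep : innerStep (fun j => |j - w|) bt (T - 1) = bt := by
          unfold innerStep; rw [if_neg hbtT]
        rw [hstep, iht k hk]
        constructor
        · rintro (h | ⟨j, h0, h1, h2, h3⟩)
          · exact Or.inl h
          · exact Or.inr ⟨j, h0, by omega, h2, h3⟩
        · rintro (h | ⟨j, h0, h1, h2, h3⟩)
          · exact Or.inl h
          · by_cases hj : j = T - 1
            · subst hj; exact absurd (hmono _ h2) hbtT
            · exact Or.inr ⟨j, h0, by omega, h2, h3⟩

-- ===== B-side characterizations (big-integer bitset) =====

theorem testBit_one' (i : Nat) : Nat.testBit 1 i = decide (i = 0) := by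
  rcases i with _|i <;> simp [Nat.testBit_eq_decide_div_mod_eq, Nat.div_eq_of_lt]

theorem shiftr_and_one (m p : Nat) : ((m >>> p) &&& 1 = 1) ↔ m.testBit p = true := by
  simp [Nat.testBit_eq_decide_div_mod_eq, Nat.and_one_is_mod, Nat.shiftRight_eq_div_pow]

theorem testBit0_and_one (r : Nat) : r.testBit 0 = true ↔ r &&& 1 = 1 := by
  simp [Nat.testBit_eq_decide_div_mod_eq, Nat.and_one_is_mod]

theorem revLoop_testBit (w : Nat) : ∀ (r : Nat), ∀ (p rev : Nat), r < 2 ^ (w - p) → ∀ k : Nat,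
    ((revLoop w r p rev).testBit k = true ↔
      rev.testBit k = true ∨ ∃ q : Nat, r.testBit q = true ∧ k = w - (p + q)) := by
  intro r
  induction r using Nat.strong_induction_on with
  | _ r ih =>
    intro p rev hlt k
    by_cases h0 : r = 0
    · subst h0
      rw [revLoop]
      simp
    · rw [revLoop, if_neg h0]
      have hr2 : r >>> 1 < r := by
        have : r >>> 1 = r / 2 := Nat.shiftRight_one r
        omega
      have hwp : p < w := by
        by_contra hc
        have h1 : w - p = 0 := by omega
        rw [h1, pow_zero] at hlt
        omega
      have hlt' : r >>> 1 < 2 ^ (w - (p + 1)) := by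
        have h2 : 2 ^ (w - p) = 2 * 2 ^ (w - p - 1) := by
          rw [← pow_succ']
          congr 1
          omega
        have h3 : r >>> 1 = r / 2 := Nat.shiftRight_one r
        have h4 : w - (p + 1) = w - p - 1 := by omega
        rw [h4, h3]
        omega
      rw [ih (r >>> 1) hr2 (p + 1) _ hlt' k]
      have hbit : ∀ q : Nat, (r >>> 1).testBit q = r.testBit (1 + q) := by
        intro q; exact Nat.testBit_shiftRight r
      have hrev' : (if r &&& 1 = 1 then rev ||| (1 <<< (w - p)) else rev).testBit k = true ↔
          rev.testBit k = true ∨ (r.testBit 0 = true ∧ k = w - p) := by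
        split
        case isTrue h1 =>
          rw [Nat.testBit_or]
          simp only [Bool.or_eq_true, Nat.one_shiftLeft]
          constructor
          · rintro (h | h)
            · exact Or.inl h
            · right
              refine ⟨(testBit0_and_one r).2 h1, ?_⟩
              rw [Nat.testBit_two_pow] at h
              have : (w - p) = k := by simpa using h
              omega
          · rintro (h | ⟨_, hk⟩)
            · exact Or.inl h
            · right
              rw [Nat.testBit_two_pow]
              simp [hk]
        case isFalse h1 =>
          constructor
          · exact Or.inl
          · rintro (h | ⟨h2, _⟩)
            · exact h
            · exact absurd ((testBit0_and_one r).1 h2) h1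
      rw [hrev']
      constructor
      · rintro ((h | h) | ⟨q, hq, hk⟩)
        · exact Or.inl h
        · exact Or.inr ⟨0, h.1, by omega⟩
        · rw [hbit q] at hq
          exact Or.inr ⟨1 + q, hq, by omega⟩
      · rintro (h | ⟨q, hq, hk⟩)
        · exact Or.inl (Or.inl h)
        · rcases q with _ | q'
          · exact Or.inl (Or.inr ⟨hq, by omega⟩)
          · refine Or.inr ⟨q', ?_, ?_⟩
            · rw [hbit q']
              have : 1 + q' = q' + 1 := by omega
              rw [this]
              exact hq
            · omega

-- the reachability predicate after the add pass (bit x of 'mask |= (mask & full) << w')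
def M1 (w Tn : Nat) (m : Nat) (x : Nat) : Prop :=
  m.testBit x = true ∨ (w ≤ x ∧ x - w ≤ Tn ∧ m.testBit (x - w) = true)

theorem m1_bit (w Tn m k : Nat) :
    ((m ||| ((m &&& (2 ^ (Tn + 1) - 1)) <<< w)).testBit k = true) ↔ M1 w Tn m k := by
  rw [Nat.testBit_or, Nat.testBit_shiftLeft, Nat.testBit_and, Nat.testBit_two_pow_sub_one]
  unfold M1
  simp only [Bool.or_eq_true, Bool.and_eq_true, decide_eq_true_eq]
  constructor
  · rintro (h | ⟨h1, h2, h3⟩)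
    · exact Or.inl h
    · exact Or.inr ⟨h1, by omega, h2⟩
  · rintro (h | ⟨h1, h2, h3⟩)
    · exact Or.inl h
    · exact Or.inr ⟨h1, h3, by omega⟩

theorem stepBit_testBit (Tn w m k : Nat) :
    ((stepBit (2 ^ (Tn + 1) - 1) w m).testBit k = true) ↔
      (M1 w Tn m k ∨ (M1 w Tn m (w + k) ∧ w + k < Tn) ∨
        ∃ q : Nat, M1 w Tn m q ∧ q < Tn ∧ q < w ∧ k = w - q) := by
  unfold stepBit
  set m1 := m ||| ((m &&& (2 ^ (Tn + 1) - 1)) <<< w) with hm1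
  set low := m1 &&& ((2 ^ (Tn + 1) - 1) >>> 1) with hlow
  have hfull1 : (2 ^ (Tn + 1) - 1) >>> 1 = 2 ^ Tn - 1 := by
    rw [Nat.shiftRight_one]
    have : 2 ^ (Tn + 1) = 2 ^ Tn * 2 := by rw [pow_succ]
    omega
  have hlowbit : ∀ x : Nat, (low.testBit x = true ↔ M1 w Tn m x ∧ x < Tn) := by
    intro x
    rw [hlow, Nat.testBit_and, hfull1, Nat.testBit_two_pow_sub_one]
    simp only [Bool.and_eq_true, decide_eq_true_eq]
    rw [m1_bit]
  have hr0 : low &&& ((1 <<< w) - 1) < 2 ^ (w - 0) := by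
    rw [Nat.one_shiftLeft]
    have h1 : low &&& (2 ^ w - 1) ≤ 2 ^ w - 1 := Nat.and_le_right
    have h2 : 0 < 2 ^ w := Nat.two_pow_pos w
    simp only [Nat.sub_zero]
    omega
  have hr0bit : ∀ q : Nat, ((low &&& ((1 <<< w) - 1)).testBit q = true ↔
      (M1 w Tn m q ∧ q < Tn) ∧ q < w) := by
    intro q
    rw [Nat.testBit_and, Nat.one_shiftLeft, Nat.testBit_two_pow_sub_one]
    simp only [Bool.and_eq_true, decide_eq_true_eq]
    rw [hlowbit]
  rw [Nat.testBit_or, Nat.testBit_or]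
  simp only [Bool.or_eq_true]
  rw [m1_bit, revLoop_testBit w _ 0 0 hr0 k]
  have hz : (0 : Nat).testBit k = false := Nat.zero_testBit k
  rw [Nat.testBit_shiftRight]
  rw [hlowbit (w + k)]
  constructor
  · rintro ((h | h) | (h | ⟨q, hq, hk⟩))
    · exact Or.inl h
    · exact Or.inr (Or.inl ⟨h.1, h.2⟩)
    · rw [hz] at h; exact absurd h (by simp)
    · rw [hr0bit q] at hq
      exact Or.inr (Or.inr ⟨q, hq.1.1, hq.1.2, hq.2, by omega⟩)
  · rintro (h | (h | ⟨q, h1, h2, h3, h4⟩))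
    · exact Or.inl (Or.inl h)
    · exact Or.inl (Or.inr h)
    · refine Or.inr (Or.inr ⟨q, ?_, by omega⟩)
      rw [hr0bit q]
      exact ⟨⟨h1, h2⟩, h3⟩

-- correspondence between A's boolean table and B's bitset
def Corr (b : Array Bool) (m : Nat) : Prop :=
  ∀ k : Int, 0 ≤ k → (pyGetBool b k = true ↔ m.testBit k.toNat = true)

-- the per-weight correspondence between A's table pass and B's bitset pass
theorem step_corr (T w s : Int) (hT : 0 ≤ T) (hT40 : T ≤ 40000) (b : Array Bool) (m : Nat)
    (hsz : b.size = 40001)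
    (hbnd : ∀ q : Nat, m.testBit q = true → (q : Int) ≤ 40000 ∧ (q : Int) ≤ s)
    (h0 : m.testBit 0 = true)
    (hcor : Corr b m)
    (hw0 : 0 ≤ w) (hmin : min T s + w ≤ 40000) :
    (stepA T w b).size = 40001 ∧
    (∀ q : Nat, (stepBit (2 ^ (T.toNat + 1) - 1) w.toNat m).testBit q = true →
      (q : Int) ≤ 40000 ∧ (q : Int) ≤ s + w) ∧
    (stepBit (2 ^ (T.toNat + 1) - 1) w.toNat m).testBit 0 = true ∧
    Corr (stepA T w b) (stepBit (2 ^ (T.toNat + 1) - 1) w.toNat m) := by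
  have hs0 : 0 ≤ s := (hbnd 0 h0).2
  have hw40 : w ≤ 40000 := by omega
  have hszA : (stepA T w b).size = 40001 := by
    unfold stepA; rw [size_innerFold, size_innerFold, hsz]
  have hTn : ((T.toNat : Int)) = T := by omega
  have hwn : ((w.toNat : Int)) = w := by omega
  -- bound on M1
  have hM1bnd : ∀ x : Nat, M1 w.toNat T.toNat m x → (x : Int) ≤ 40000 ∧ (x : Int) ≤ s + w := by
    intro x hx
    rcases hx with hx | ⟨h1, h2, h3⟩
    · have := hbnd x hx
      omega
    · have hb := hbnd (x - w.toNat) h3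
      have h4 : ((x - w.toNat : Nat) : Int) = (x : Int) - w := by omega
      have h5 : ((x - w.toNat : Nat) : Int) ≤ T := by omega
      constructor
      · have : (x : Int) - w ≤ min T s := by rw [← h4] at *; omega
        omega
      · omega
  -- M1 characterizes A's first inner loop
  have hin : ∀ j : Int, 0 ≤ j → j ≤ T → pyGetBool b j = true → j + w ≤ 40000 := by
    intro j hj hjT hG
    have hjr := (hcor j hj).1 hG
    have hb := hbnd j.toNat hjr
    have : j ≤ min T s := by omega
    omega
  have hc1 : ∀ k : Int, 0 ≤ k →
      (pyGetBool ((PySem.List.pyRange T (-1) (-1)).foldl (innerStep (fun j => j + w)) b) k = true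
        ↔ M1 w.toNat T.toNat m k.toNat) := by
    intro k hk
    rw [loop1_char w hw0 (T + 1).toNat T (by omega) b hsz hin k hk]
    unfold M1
    constructor
    · rintro (h | ⟨j, h0j, h1, h2, h3⟩)
      · exact Or.inl ((hcor k hk).1 h)
      · refine Or.inr ⟨by omega, by omega, ?_⟩
        have hj : k.toNat - w.toNat = j.toNat := by omega
        rw [hj]
        exact (hcor j h0j).1 h2
    · rintro (h | ⟨h1, h2, h3⟩)
      · exact Or.inl ((hcor k hk).2 h)
      · refine Or.inr ⟨((k.toNat - w.toNat : Nat) : Int), by omega, by omega, ?_, by omega⟩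
        refine (hcor _ (by omega)).2 ?_
        rw [Int.toNat_natCast]
        exact h3
  have hsz1 : ((PySem.List.pyRange T (-1) (-1)).foldl (innerStep (fun j => j + w)) b).size = 40001 := by
    rw [size_innerFold, hsz]
  refine ⟨hszA, ?_, ?_, ?_⟩
  · -- bit bounds for B's step
    intro q hq
    rw [stepBit_testBit] at hq
    rcases hq with hq | ⟨hq, _⟩ | ⟨x, hx, _, hxw, hqe⟩
    · exact hM1bnd q hq
    · have := hM1bnd _ hq
      omega
    · have := hM1bnd x hx
      have : (q : Int) = w - (x : Int) := by omega
      omega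
  · -- bit 0 survives
    rw [stepBit_testBit]
    exact Or.inl (Or.inl h0)
  · -- correspondence of the full step
    intro k hk
    unfold stepA
    rw [loop2_char w hw0 hw40 (T + 1).toNat T (by omega) (by omega) _ hsz1 k hk]
    rw [stepBit_testBit]
    constructor
    · rintro (h | ⟨j, h0j, h1, h2, h3⟩)
      · exact Or.inl ((hc1 k hk).1 h)
      · have hM1j := (hc1 j h0j).1 h2
        by_cases hjw : w ≤ j
        · -- k = j - w : the 'low >> w' part
          have he : w.toNat + k.toNat = j.toNat := by
            rcases abs_cases (j - w) with ⟨he, _⟩ | ⟨he, _⟩ <;> omega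
          refine Or.inr (Or.inl ⟨?_, by omega⟩)
          rw [he]
          exact hM1j
        · -- k = w - j : the reflection part
          refine Or.inr (Or.inr ⟨j.toNat, hM1j, by omega, by omega, ?_⟩)
          rcases abs_cases (j - w) with ⟨he, _⟩ | ⟨he, _⟩ <;> omega
    · rintro (h | ⟨h1, h2⟩ | ⟨x, hx, hxT, hxw, hke⟩)
      · exact Or.inl ((hc1 k hk).2 h)
      · refine Or.inr ⟨((w.toNat + k.toNat : Nat) : Int), by omega, by omega, ?_, ?_⟩
        · refine (hc1 _ (by omega)).2 ?_
          rw [Int.toNat_natCast]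
          exact h1
        · rcases abs_cases (((w.toNat + k.toNat : Nat) : Int) - w) with ⟨he, _⟩ | ⟨he, _⟩ <;> omega
      · refine Or.inr ⟨(x : Int), by omega, by omega, ?_, ?_⟩
        · refine (hc1 (x : Int) (by omega)).2 ?_
          rw [Int.toNat_natCast]
          exact hx
        · rcases abs_cases ((x : Int) - w) with ⟨he, _⟩ | ⟨he, _⟩ <;> omega

-- the whole per-weight fold preserves the correspondence
theorem main_corr (T : Int) (hT : 0 ≤ T) (hT40 : T ≤ 40000) :
    ∀ (ws : List Int) (s : Int) (b : Array Bool) (m : Nat),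
    wOKb T ws s = true → b.size = 40001 →
    (∀ q : Nat, m.testBit q = true → (q : Int) ≤ 40000 ∧ (q : Int) ≤ s) →
    m.testBit 0 = true →
    Corr b m →
    ((ws.foldl (fun bal w => stepA T w bal) b).size = 40001 ∧
     Corr (ws.foldl (fun bal w => stepA T w bal) b)
          (ws.foldl (fun mm w => stepBit (2 ^ (T.toNat + 1) - 1) w.toNat mm) m)) := by
  intro ws
  induction ws with
  | nil =>
    intro s b m _ h1 _ _ h3
    exact ⟨h1, h3⟩
  | cons w t ih =>
    intro s b m hok h1 h2 h0 h3
    have hok' : (0 ≤ w ∧ min T s + w ≤ 40000) ∧ wOKb T t (s + w) = true := by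
      simpa [wOKb, Bool.and_eq_true, decide_eq_true_eq] using hok
    have hstep := step_corr T w s hT hT40 b m h1 h2 h0 h3 hok'.1.1 hok'.1.2
    simp only [List.foldl_cons]
    exact ih (s + w) _ _ hok'.2 hstep.1 hstep.2.1 hstep.2.2.1 hstep.2.2.2

-- A's outer 'for i in range(N)' with weights[i] is the fold over the first N weights
theorem outer_bridge_A (T : Int) (ws : List Int) (N : Int) (h0 : 0 ≤ N) (hN : N ≤ ws.length)
    (init : Array Bool) :
    (PySem.List.pyRange 0 N 1).foldl
      (fun bal i => stepA T (PySem.List.pyGetD ws i 0) bal) init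
      = (ws.take N.toNat).foldl (fun bal w => stepA T w bal) init := by
  have hlen : ((ws.take N.toNat).length : Int) = N := by
    simp only [List.length_take]
    omega
  have hcongr : ∀ (acc : Array Bool), ∀ x ∈ PySem.List.pyRange 0 N 1,
      (fun bal i => stepA T (PySem.List.pyGetD ws i 0) bal) acc x
        = (fun bal i => stepA T (PySem.List.pyGetD (ws.take N.toNat) i 0) bal) acc x := by
    intro acc x hx
    rw [PySem.List.mem_pyRange_one] at hx
    dsimp only
    have h1 : PySem.List.pyGetD ws x 0 = ws[x.toNat]'(by omega) :=
      PySem.List.pyGetD_eq_getElem ws 0 hx.1 (by omega)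
    have h2 : PySem.List.pyGetD (ws.take N.toNat) x 0
        = (ws.take N.toNat)[x.toNat]'(by simp only [List.length_take]; omega) :=
      PySem.List.pyGetD_eq_getElem _ 0 hx.1 (by rw [hlen]; exact hx.2)
    rw [h1, h2]
    exact congrArg (fun z => stepA T z acc) List.getElem_take.symm
  rw [PySem.List.foldl_congr_mem _ _ _ init hcongr]
  set l := ws.take N.toNat with hl
  rw [show PySem.List.pyRange 0 N 1 = PySem.List.pyRange 0 ((l.length : Int)) 1 from by rw [hlen]]
  exact PySem.List.foldl_pyRange_zero_pyGetD' l 0 (fun bal w => stepA T w bal) init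

theorem getBool_init (k : Int) (hk : 0 ≤ k) :
    (pyGetBool ((Array.replicate 40001 false).set! 0 true) k = true ↔ k = 0) := by
  have hsz : ((Array.replicate 40001 false).set! 0 true).size = 40001 := by simp [Array.set!]
  unfold pyGetBool
  rw [hsz, pyWrap_nonneg _ k hk]
  by_cases h : 0 ≤ k ∧ k.toNat < 40001
  · rw [if_pos h, getD_set_true _ 0 k.toNat (by simp)]
    by_cases he : k = 0
    · subst he; simp
    · rw [if_neg (by omega)]
      have hrep : (Array.replicate 40001 false).getD k.toNat false = false := by
        rw [Array.getD_eq_getD_getElem?, Array.getElem?_replicate]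
        split <;> rfl
      rw [hrep]
      constructor
      · intro hh; exact absurd hh (by simp)
      · intro h0; omega
  · rw [if_neg h]
    constructor
    · intro hh; exact absurd hh (by simp)
    · intro h0; omega

theorem corr_init : Corr ((Array.replicate 40001 false).set! 0 true) 1 := by
  intro k hk
  rw [getBool_init k hk, testBit_one']
  constructor
  · intro h; subst h; simp
  · intro h
    have : k.toNat = 0 := by simpa using h
    omega

theorem stepA_neg (T w : Int) (hT : T < 0) (b : Array Bool) : stepA T w b = b := by
  unfold stepA
  rw [PySem.List.pyRange_neg_one_eq_nil (by omega), PySem.List.pyRange_one_eq_nil (by omega)]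
  simp only [List.foldl_nil]

theorem foldl_stepA_neg (T : Int) (hT : T < 0) (l : List Int) (g : Int → Int) (b : Array Bool) :
    l.foldl (fun bal i => stepA T (g i) bal) b = b := by
  induction l generalizing b with
  | nil => rfl
  | cons x t ih =>
    simp only [List.foldl_cons]
    rw [stepA_neg T (g x) hT b]
    exact ih b

-- B's final test '(mask >> marble) & 1' against A's table read, for the initial mask 1
theorem final_compare (marble : Int) (hm0 : 0 ≤ marble) :
    (if pyGetBool ((Array.replicate 40001 false).set! 0 true) marble then "Y" else "N")
      = (if ((1 : Nat) >>> marble.toNat) &&& 1 = 1 then "Y" else "N") := by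
  have h1 := getBool_init marble hm0
  have h2 := corr_init marble hm0
  by_cases hG : pyGetBool ((Array.replicate 40001 false).set! 0 true) marble = true
  · rw [hG, if_pos ((shiftr_and_one 1 marble.toNat).2 (h2.1 hG))]
    simp
  · have hGf : pyGetBool ((Array.replicate 40001 false).set! 0 true) marble = false := by
      revert hG; cases pyGetBool ((Array.replicate 40001 false).set! 0 true) marble <;> simp
    rw [hGf]
    rw [if_neg (fun hc => hG (h2.2 ((shiftr_and_one 1 marble.toNat).1 hc)))]
    simp

-- ===== VERDICT (by name: the statement is the Claim_ definition above) =====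
theorem dp_spec : Claim_equal_dp := by
  intro N weights T marble _hDom hPre
  obtain ⟨hm0, hm1, hTcond⟩ := hPre
  unfold Spec_dp
  simp only [dp, dp_alt]
  have hfull : (1 <<< (T.toNat + 1)) - 1 = 2 ^ (T.toNat + 1) - 1 := by
    rw [Nat.one_shiftLeft]
  by_cases hT : 0 ≤ T
  · by_cases hNp : 0 < N
    · obtain ⟨hNlen, hT40, hwts⟩ := hTcond hT (by omega)
      have hN0 : 0 ≤ N := by omega
      have hcond : 0 < N ∧ 0 ≤ T := ⟨hNp, hT⟩
      rw [outer_bridge_A T weights N hN0 hNlen _, if_pos hcond, hfull,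
        PySem.List.slice_to weights hN0]
      have hsz0 : ((Array.replicate 40001 false).set! 0 true).size = 40001 := by
        simp [Array.set!]
      have hbnd0 : ∀ q : Nat, (1 : Nat).testBit q = true → (q : Int) ≤ 40000 ∧ (q : Int) ≤ 0 := by
        intro q hq
        rw [testBit_one'] at hq
        have : q = 0 := by simpa using hq
        omega
      have h01 : (1 : Nat).testBit 0 = true := by rw [testBit_one']; simp
      obtain ⟨_, hcorF⟩ := main_corr T hT hT40 (weights.take N.toNat) 0
        ((Array.replicate 40001 false).set! 0 true) 1 hwts hsz0 hbnd0 h01 corr_init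
      have hfin := hcorF marble hm0
      by_cases hG : pyGetBool ((weights.take N.toNat).foldl (fun bal w => stepA T w bal)
          ((Array.replicate 40001 false).set! 0 true)) marble = true
      · rw [hG, if_pos ((shiftr_and_one _ _).2 (hfin.1 hG))]
        simp
      · have hGf : pyGetBool ((weights.take N.toNat).foldl (fun bal w => stepA T w bal)
            ((Array.replicate 40001 false).set! 0 true)) marble = false := by
          revert hG
          cases pyGetBool ((weights.take N.toNat).foldl (fun bal w => stepA T w bal)
            ((Array.replicate 40001 false).set! 0 true)) marble <;> simp
        rw [hGf]
        rw [if_neg (fun hc => hG (hfin.2 ((shiftr_and_one _ _).1 hc)))]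
        simp
    · -- N ≤ 0: the loop runs zero times on both sides
      have hNcond : ¬ (0 < N ∧ 0 ≤ T) := fun hc => hNp hc.1
      rw [PySem.List.pyRange_one_eq_nil (by omega), List.foldl_nil, if_neg hNcond]
      exact final_compare marble hm0
  · -- totalWeight < 0: A's inner loops are empty; B skips the loop entirely
    have hTcond' : ¬ (0 < N ∧ 0 ≤ T) := fun hc => hT hc.2
    rw [foldl_stepA_neg T (by omega) (PySem.List.pyRange 0 N 1)
      (fun i => PySem.List.pyGetD weights i 0) ((Array.replicate 40001 false).set! 0 true),
      if_neg hTcond']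
    exact final_compare marble hm0
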